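-- pv_equiv track=rewrite | github.com/clover3/Chair | src/cie/claim_gen.py | appear_at_least
-- ===== SOURCE A (Python) =====
-- from collections import Counter, defaultdict
--
-- def appear_at_least(dependency_edges, k):
--     def identity(edge):
--         return " ".join(edge.values())
--
--     count = Counter([identity(edge) for edge in dependency_edges])
--     unique_ids = set()
--     for edge in dependency_edges:
--         id = identity(edge)
--         if count[id] >= k and id not in unique_ids:
--             unique_ids.add(id)
--             yield edge
-- ===== SOURCE B (Python) =====
-- def appear_at_least(dependency_edges, k):
--     def identity(edge):
--         return " ".join(edge.values())
--
--     edges = list(dependency_edges)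
--     while edges:
--         head = edges[0]
--         hid = identity(head)
--         if 1 + sum(1 for e in edges[1:] if identity(e) == hid) >= k:
--             yield head
--         edges = [e for e in edges[1:] if identity(e) != hid]
-- ===== Notes on version B (the rewrite author's own statement) =====
-- stated objective: alternative
-- what changed: B drops A's Counter and seen-set entirely: it repeatedly takes the head edge, counts its identity directly in the remaining list, yields it if the count reaches k, and recurses on the list with every edge of that identity removed; first-occurrence order falls out of taking heads in order. It trades A's two hashed passes for a quadratic remove-and-recurse scan.
import Mathlib
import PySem

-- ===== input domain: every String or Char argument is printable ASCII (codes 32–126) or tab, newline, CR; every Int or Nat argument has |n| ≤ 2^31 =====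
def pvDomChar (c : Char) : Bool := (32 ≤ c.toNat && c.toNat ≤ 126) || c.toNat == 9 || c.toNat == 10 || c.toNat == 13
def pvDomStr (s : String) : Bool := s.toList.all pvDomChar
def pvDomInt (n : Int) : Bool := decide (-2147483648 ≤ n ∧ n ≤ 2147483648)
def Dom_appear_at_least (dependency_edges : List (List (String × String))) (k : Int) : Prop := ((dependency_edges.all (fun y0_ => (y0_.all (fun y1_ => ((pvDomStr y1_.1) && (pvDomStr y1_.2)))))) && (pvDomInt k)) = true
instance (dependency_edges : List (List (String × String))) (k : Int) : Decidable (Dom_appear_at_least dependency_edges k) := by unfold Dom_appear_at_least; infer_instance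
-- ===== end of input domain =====

-- B replaces A's Counter + seen-set double pass by a remove-and-recurse scan with no auxiliary
-- structures (take the head, count its identity in place, drop that identity, recurse);
-- objective: alternative algorithm, same return value (B iterates the argument once where A
-- iterates it twice, so only reiterable inputs — lists, as here — are concerned).

-- ===== PORT A =====
-- identity(edge) = " ".join(edge.values()); edge is a Python dict, ported as an association list
def pvIdentity (edge : List (String × String)) : String :=
  PySem.Str.join " " (PySem.Dict.ofList edge).values

def appear_at_least (dependency_edges : List (List (String × String))) (k : Int) : List (List (String × String)) :=
  let count : PySem.Dict String Int :=
    PySem.Dict.counter (dependency_edges.map (fun edge => pvIdentity edge))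
  (dependency_edges.foldl
    (fun st edge =>
      let id := pvIdentity edge
      if count.getD id 0 ≥ k ∧ ¬ PySem.Set.contains st.1 id = true then
        (PySem.Set.add st.1 id, st.2 ++ [edge])
      else st)
    ((PySem.Set.empty : PySem.Set String), ([] : List (List (String × String))))).2

-- ===== PORT B =====
-- while edges: head = edges[0]; count head's identity in edges; maybe yield head;
--              edges = [e for e in edges[1:] if identity(e) != hid]
def pvAltGo (k : Int) : List (List (String × String)) → List (List (String × String))
  | [] => []
  | head :: rest =>
    let hid := pvIdentity head
    let restF := rest.filter (fun e => !(pvIdentity e == hid))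
    if 1 + (rest.countP (fun e => pvIdentity e == hid) : Int) ≥ k
    then head :: pvAltGo k restF
    else pvAltGo k restF
termination_by l => l.length
decreasing_by all_goals
  simpa using Nat.lt_succ_of_le (le_trans (List.length_filter_le _ _) (by simp))

def appear_at_least_alt (dependency_edges : List (List (String × String))) (k : Int) : List (List (String × String)) :=
  pvAltGo k dependency_edges

-- ===== PRECONDITION & SPEC =====
def Spec_appear_at_least (dependency_edges : List (List (String × String))) (k : Int) (out : List (List (String × String))) : Prop := out = appear_at_least_alt dependency_edges k
instance (dependency_edges : List (List (String × String))) (k : Int) (out : List (List (String × String))) : Decidable (Spec_appear_at_least dependency_edges k out) := by unfold Spec_appear_at_least; infer_instance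

-- ===== CLAIM (what is proved, stated in full; the proofs are below) =====
def Claim_equal_appear_at_least : Prop := ∀ (dependency_edges : List (List (String × String))) (k : Int), Dom_appear_at_least dependency_edges k → Spec_appear_at_least dependency_edges k (appear_at_least dependency_edges k)

-- ===== LEMMAS AND PROOFS =====

-- edges of t whose identity is a first occurrence not already in s, in order
def pvFirsts (t : List (List (String × String))) (s : PySem.Set String) : List (List (String × String)) :=
  match t with
  | [] => []
  | e :: t =>
    if s.contains (pvIdentity e) then pvFirsts t s
    else e :: pvFirsts t (PySem.Set.add s (pvIdentity e))

theorem pvFirsts_congr (t : List (List (String × String))) (s₁ s₂ : PySem.Set String)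
    (h : ∀ x, x ∈ s₁ ↔ x ∈ s₂) : pvFirsts t s₁ = pvFirsts t s₂ := by
  induction t generalizing s₁ s₂ with
  | nil => rfl
  | cons e t ih =>
    have hc : s₁.contains (pvIdentity e) = s₂.contains (pvIdentity e) := by
      by_cases hm : pvIdentity e ∈ s₂
      · simp [hm, (h _).2 hm]
      · have hm1 : pvIdentity e ∉ s₁ := fun hx => hm ((h _).1 hx)
        simp [hm, hm1]
    simp only [pvFirsts, hc]
    split
    · exact ih s₁ s₂ h
    · refine congrArg _ (ih _ _ ?_)
      intro x
      simp [PySem.Set.mem_add, h x]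

theorem pvFirsts_filter_add (t : List (List (String × String))) (s : PySem.Set String)
    (id : String) (q : String → Bool) (hq : q id = false) :
    (pvFirsts t (PySem.Set.add s id)).filter (fun e => q (pvIdentity e))
      = (pvFirsts t s).filter (fun e => q (pvIdentity e)) := by
  induction t generalizing s with
  | nil => rfl
  | cons e t ih =>
    by_cases hm : pvIdentity e ∈ s
    · have h1 : (PySem.Set.add s id).contains (pvIdentity e) = true := by
        simp [PySem.Set.mem_add, hm]
      have h2 : s.contains (pvIdentity e) = true := by simp [hm]
      simp only [pvFirsts, h1, h2, if_true]
      exact ih s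
    · by_cases hid : pvIdentity e = id
      · subst hid
        simp [pvFirsts, hq, hm]
      · have h1 : (PySem.Set.add s id).contains (pvIdentity e) = false := by
          simp [PySem.Set.mem_add, hm, hid]
        have h2 : s.contains (pvIdentity e) = false := by simp [hm]
        simp only [pvFirsts, h1, h2, Bool.false_eq_true, if_false, List.filter_cons]
        have hswap : pvFirsts t (PySem.Set.add (PySem.Set.add s id) (pvIdentity e))
            = pvFirsts t (PySem.Set.add (PySem.Set.add s (pvIdentity e)) id) := by
          refine pvFirsts_congr _ _ _ (fun x => ?_)
          simp only [PySem.Set.mem_add]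
          exact or_right_comm
        rw [hswap, ih (PySem.Set.add s (pvIdentity e))]

-- A's yield loop computes the q-filter of the first occurrences
theorem pvFoldA (count : PySem.Dict String Int) (k : Int)
    (t : List (List (String × String))) (s : PySem.Set String)
    (o : List (List (String × String))) :
    (t.foldl
      (fun st edge =>
        let id := pvIdentity edge
        if count.getD id 0 ≥ k ∧ ¬ PySem.Set.contains st.1 id = true then
          (PySem.Set.add st.1 id, st.2 ++ [edge])
        else st)
      (s, o)).2
      = o ++ (pvFirsts t s).filter (fun e => decide (count.getD (pvIdentity e) 0 ≥ k)) := by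
  induction t generalizing s o with
  | nil => simp [pvFirsts]
  | cons e t ih =>
    by_cases hc : s.contains (pvIdentity e) = true
    · simp only [List.foldl_cons, pvFirsts, hc, if_true]
      simp only [not_true, and_false, if_false]
      exact ih s o
    · simp only [Bool.not_eq_true] at hc
      by_cases hk : count.getD (pvIdentity e) 0 ≥ k
      · simp only [List.foldl_cons, pvFirsts, hc, Bool.false_eq_true, if_false]
        simp only [not_false_iff, hk, true_and, if_true]
        rw [ih _ _]
        simp [hk]
      · simp only [List.foldl_cons, pvFirsts, hc, Bool.false_eq_true, if_false]
        simp only [hk, false_and, if_false]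
        rw [ih s o, List.filter_cons, if_neg (by simp [hk])]
        exact congrArg (fun l => o ++ l)
          (pvFirsts_filter_add t s (pvIdentity e)
            (fun id => decide (count.getD id 0 ≥ k)) (by simp [hk])).symm

-- every edge listed by pvFirsts has an identity not yet in the seen set
theorem pvFirsts_id_not_mem (t : List (List (String × String))) (s : PySem.Set String)
    (e : List (String × String)) (he : e ∈ pvFirsts t s) : pvIdentity e ∉ s := by
  induction t generalizing s with
  | nil => simp [pvFirsts] at he
  | cons a t ih =>
    by_cases hc : s.contains (pvIdentity a) = true
    · simp only [pvFirsts, hc, if_true] at he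
      exact ih s he
    · simp only [Bool.not_eq_true] at hc
      simp only [pvFirsts, hc, Bool.false_eq_true, if_false, List.mem_cons] at he
      rcases he with he | he
      · subst he; simpa using hc
      · intro hm
        exact ih _ he (by simp [PySem.Set.mem_add, hm])

-- dropping all edges of an unseen identity x = seeding the seen set with x
theorem pvFirsts_filter_ne (t : List (List (String × String))) (s : PySem.Set String)
    (x : String) (hx : x ∉ s) :
    pvFirsts (t.filter (fun e => !(pvIdentity e == x))) s = pvFirsts t (PySem.Set.add s x) := by
  induction t generalizing s with
  | nil => rfl
  | cons e t ih =>
    by_cases hex : pvIdentity e = x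
    · have hcs : (PySem.Set.add s x).contains x = true := by
        simp [PySem.Set.mem_add]
      simp only [List.filter_cons, hex, beq_self_eq_true, Bool.not_true, Bool.false_eq_true,
        if_false, pvFirsts, hcs, if_true]
      exact ih s hx
    · have hbe : (pvIdentity e == x) = false := by simp [hex]
      by_cases hm : pvIdentity e ∈ s
      · have h1 : s.contains (pvIdentity e) = true := by simp [hm]
        have h2 : (PySem.Set.add s x).contains (pvIdentity e) = true := by
          simp [PySem.Set.mem_add, hm]
        simp only [List.filter_cons, hbe, Bool.not_false, if_true, pvFirsts, h1, h2, if_true]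
        exact ih s hx
      · have h1 : s.contains (pvIdentity e) = false := by simp [hm]
        have h2 : (PySem.Set.add s x).contains (pvIdentity e) = false := by
          simp [PySem.Set.mem_add, hm, hex]
        simp only [List.filter_cons, hbe, Bool.not_false, if_true, pvFirsts, h1, h2,
          Bool.false_eq_true, if_false]
        refine congrArg _ ?_
        rw [ih (PySem.Set.add s (pvIdentity e))
          (by simp only [PySem.Set.mem_add, not_or]; exact ⟨hx, fun h => hex h.symm⟩)]
        refine pvFirsts_congr _ _ _ (fun y => ?_)
        simp only [PySem.Set.mem_add]
        exact or_right_comm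

-- B's recursion computes the first occurrences filtered by their in-place count
theorem pvAltGo_eq (k : Int) (n : Nat) (t : List (List (String × String)))
    (hn : t.length ≤ n) :
    pvAltGo k t
      = (pvFirsts t PySem.Set.empty).filter
          (fun e => decide (k ≤ (t.countP (fun e' => pvIdentity e' == pvIdentity e) : Int))) := by
  induction n generalizing t with
  | zero =>
    have : t = [] := List.length_eq_zero_iff.mp (Nat.le_zero.mp hn)
    subst this; simp [pvAltGo, pvFirsts]
  | succ n ih =>
    match t with
    | [] => simp [pvAltGo, pvFirsts]
    | head :: rest =>
      have hce : (PySem.Set.empty : PySem.Set String).contains (pvIdentity head) = false := rfl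
      have hcnt : ((head :: rest).countP
          (fun e' => pvIdentity e' == pvIdentity head) : Int)
          = 1 + (rest.countP (fun e' => pvIdentity e' == pvIdentity head) : Int) := by
        rw [List.countP_cons]
        simp only [beq_self_eq_true, if_true]
        push_cast; ring
      have hlen : (rest.filter (fun e => !(pvIdentity e == pvIdentity head))).length ≤ n :=
        le_trans (List.length_filter_le _ _) (Nat.le_of_succ_le_succ hn)
      simp only [pvAltGo, pvFirsts, hce, Bool.false_eq_true, if_false, List.filter_cons, hcnt]
      rw [ih _ hlen]
      rw [pvFirsts_filter_ne rest PySem.Set.empty (pvIdentity head) (by simp [PySem.Set.empty])]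
      have hfc : (pvFirsts rest (PySem.Set.add PySem.Set.empty (pvIdentity head))).filter
            (fun e => decide (k ≤ ((rest.filter (fun e' => !(pvIdentity e' == pvIdentity head))).countP
              (fun e' => pvIdentity e' == pvIdentity e) : Int)))
          = (pvFirsts rest (PySem.Set.add PySem.Set.empty (pvIdentity head))).filter
            (fun e => decide (k ≤ ((head :: rest).countP
              (fun e' => pvIdentity e' == pvIdentity e) : Int))) := by
        refine List.filter_congr ?_
        intro e he
        have hne : pvIdentity e ≠ pvIdentity head := by
          have := pvFirsts_id_not_mem _ _ _ he
          simp only [PySem.Set.mem_add, not_or] at this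
          exact this.2
        have hcf : (rest.filter (fun e' => !(pvIdentity e' == pvIdentity head))).countP
            (fun e' => pvIdentity e' == pvIdentity e)
            = (head :: rest).countP (fun e' => pvIdentity e' == pvIdentity e) := by
          rw [List.countP_filter, List.countP_cons]
          simp only [show (pvIdentity head == pvIdentity e) = false by simp [Ne.symm hne],
            Bool.false_eq_true, if_false, Nat.add_zero]
          refine List.countP_congr ?_
          intro e' _
          by_cases h : pvIdentity e' = pvIdentity e
          · simp [h, hne]
          · simp [h]
        rw [hcf]
      rw [hfc]
      by_cases hk : 1 + (rest.countP (fun e => pvIdentity e == pvIdentity head) : Int) ≥ k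
      · rw [if_pos hk, if_pos (by simpa using hk)]
      · rw [if_neg hk, if_neg (by simpa using hk)]

-- ===== VERDICT (by name: the statement is the Claim_ definition above) =====
theorem appear_at_least_spec : Claim_equal_appear_at_least := by
  intro edges k _
  unfold Spec_appear_at_least appear_at_least appear_at_least_alt
  simp only []
  rw [pvFoldA, pvAltGo_eq k edges.length edges le_rfl, List.nil_append]
  refine List.filter_congr ?_
  intro e _
  have h1 : (PySem.Dict.counter (edges.map (fun edge => pvIdentity edge))).getD (pvIdentity e) 0
      = ((edges.map (fun edge => pvIdentity edge)).count (pvIdentity e) : Int) :=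
    PySem.Dict.getD_counter _ _
  have h2 : (edges.map (fun edge => pvIdentity edge)).count (pvIdentity e)
      = edges.countP (fun e' => pvIdentity e' == pvIdentity e) := by
    rw [List.count, List.countP_map]; rfl
  simp [h1, h2, ge_iff_le]
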